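-- pv_equiv track=rewrite | github.com/crazybass81/T-Developer | backend/src/analysis/analysis_history.py | _has_repeating_pattern
-- ===== SOURCE A (Python) =====
-- from typing import Dict, List
--
-- def _has_repeating_pattern(sequences: List[set], cycle_length: int) -> bool:
--     """Check if there's a repeating pattern of given length"""
--     if len(sequences) < cycle_length * 2:
--         return False
--
--     # Check if pattern repeats at least twice
--     for start in range(len(sequences) - cycle_length * 2 + 1):
--         pattern = sequences[start : start + cycle_length]
--         next_pattern = sequences[start + cycle_length : start + cycle_length * 2]
--
--         if pattern == next_pattern:
--             return True
--
--     return False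
-- ===== SOURCE B (Python) =====
-- def _has_repeating_pattern(sequences, cycle_length):
--     """Check if there's a repeating pattern of given length (linear scan).
--
--     Instead of comparing two length-L slices for every start (O(n*L)),
--     compare each element once with the element L positions later and look
--     for a run of L consecutive matches (O(n))."""
--     L = cycle_length
--     if L <= 0:
--         return True  # a non-positive-length pattern repeats trivially
--     n = len(sequences)
--     run = 0
--     for i in range(n - L):
--         if sequences[i] == sequences[i + L]:
--             run += 1
--             if run == L:
--                 return True
--         else:
--             run = 0
--     return False
-- ===== Notes on version B (the rewrite author's own statement) =====
-- stated objective: faster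
-- what changed: Replaces the per-start comparison of two length-L slices with a single pass that compares sequences[i] to sequences[i+L] and looks for a run of L consecutive matches.
import Mathlib
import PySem

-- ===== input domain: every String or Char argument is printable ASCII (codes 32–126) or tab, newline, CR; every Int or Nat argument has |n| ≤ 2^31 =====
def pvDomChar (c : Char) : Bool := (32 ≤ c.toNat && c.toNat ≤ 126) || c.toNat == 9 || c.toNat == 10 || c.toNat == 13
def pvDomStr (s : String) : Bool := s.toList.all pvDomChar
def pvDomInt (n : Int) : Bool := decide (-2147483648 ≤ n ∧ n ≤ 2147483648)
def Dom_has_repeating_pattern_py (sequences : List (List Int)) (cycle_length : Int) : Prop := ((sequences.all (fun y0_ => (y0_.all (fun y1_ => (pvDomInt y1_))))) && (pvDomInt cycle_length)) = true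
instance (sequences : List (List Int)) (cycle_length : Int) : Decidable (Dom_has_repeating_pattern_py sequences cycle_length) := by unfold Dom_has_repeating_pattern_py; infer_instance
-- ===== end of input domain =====

-- B replaces A's per-start slice comparison by one linear pass over eq[i] = (sequences[i] == sequences[i+L]),
-- looking for L consecutive matches; proved to return A's exact value on every input.

-- ===== PORT A =====
-- the `for start in range(...)` loop with early `return True`, one fuel unit per iteration
def pvLoopA (sequences : List (List Int)) (cycle_length : Int) (fuel : Nat) (start : Int) : Bool :=
  match fuel with
  | 0 => false
  | f + 1 =>
    if PySem.List.slice sequences (some start) (some (start + cycle_length)) ==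
        PySem.List.slice sequences (some (start + cycle_length))
          (some (start + cycle_length * 2)) then true
    else pvLoopA sequences cycle_length f (start + 1)

def has_repeating_pattern_py (sequences : List (List Int)) (cycle_length : Int) : Bool :=
  if (sequences.length : Int) < cycle_length * 2 then false
  else pvLoopA sequences cycle_length
    ((sequences.length : Int) - cycle_length * 2 + 1).toNat 0

-- ===== PORT B =====
def has_repeating_pattern_py_alt (sequences : List (List Int)) (cycle_length : Int) : Bool :=
  if cycle_length ≤ 0 then true
  else
    ((PySem.List.pyRange 0 ((sequences.length : Int) - cycle_length) 1).foldl
      (fun (st : Int × Bool) i =>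
        if st.2 then st
        else if PySem.List.pyGetD sequences i [] = PySem.List.pyGetD sequences (i + cycle_length) [] then
          if st.1 + 1 = cycle_length then (st.1 + 1, true) else (st.1 + 1, false)
        else (0, false))
      (0, false)).2

-- ===== PRECONDITION & SPEC =====
def Spec_has_repeating_pattern_py (sequences : List (List Int)) (cycle_length : Int) (out : Bool) : Prop := out = has_repeating_pattern_py_alt sequences cycle_length
instance (sequences : List (List Int)) (cycle_length : Int) (out : Bool) : Decidable (Spec_has_repeating_pattern_py sequences cycle_length out) := by unfold Spec_has_repeating_pattern_py; infer_instance

-- ===== CLAIM (what is proved, stated in full; the proofs are below) =====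
def Claim_equal_has_repeating_pattern_py : Prop := ∀ (sequences : List (List Int)) (cycle_length : Int), Dom_has_repeating_pattern_py sequences cycle_length → Spec_has_repeating_pattern_py sequences cycle_length (has_repeating_pattern_py sequences cycle_length)



-- ===== LEMMAS AND PROOFS =====

-- The step function of B's scan, with the boolean match precomputed.
def pvStep (L : Int) (st : Int × Bool) (b : Bool) : Int × Bool :=
  if st.2 then st
  else if b then (if st.1 + 1 = L then (st.1 + 1, true) else (st.1 + 1, false))
  else (0, false)

-- The list of neighbour-at-distance-Ln comparisons B scans over.
def pvBs (seqs : List (List Int)) (Ln : Nat) : List Bool :=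
  (PySem.List.pyRange 0 ((seqs.length : Int) - (Ln : Int)) 1).map
    (fun i => decide (PySem.List.pyGetD seqs i ([] : List Int) =
      PySem.List.pyGetD seqs (i + (Ln : Int)) ([] : List Int)))

lemma pvBs_length (seqs : List (List Int)) (Ln : Nat) :
    (pvBs seqs Ln).length = seqs.length - Ln := by
  simp only [pvBs, List.length_map, PySem.List.length_pyRange_one]
  omega

lemma pvBs_getD (seqs : List (List Int)) (Ln i : Nat) (h : i < seqs.length - Ln) :
    (pvBs seqs Ln).getD i false =
      decide (seqs.getD i ([] : List Int) = seqs.getD (i + Ln) ([] : List Int)) := by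
  rw [List.getD_eq_getElem _ _ (by rw [pvBs_length]; omega)]
  simp only [pvBs, List.getElem_map, PySem.List.getElem_pyRange_one]
  rw [show (0 : Int) + (i : Int) = ((i : Nat) : Int) from by ring]
  rw [show ((i : Nat) : Int) + (Ln : Int) = ((i + Ln : Nat) : Int) from by omega]
  rw [PySem.List.pyGetD_natCast, PySem.List.pyGetD_natCast]

-- once found, the scan keeps (r, true)
lemma pvStep_found (L : Int) (bs : List Bool) (r : Int) :
    bs.foldl (pvStep L) (r, true) = (r, true) := by
  induction bs with
  | nil => rfl
  | cons b bs ih => simpa [pvStep] using ih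

-- the fuel loop of port A is `any` over the corresponding range
lemma pvLoopA_eq_any (seqs : List (List Int)) (L : Int) : ∀ (fuel : Nat) (start : Int),
    pvLoopA seqs L fuel start =
      (PySem.List.pyRange start (start + (fuel : Int)) 1).any
        (fun s => PySem.List.slice seqs (some s) (some (s + L)) ==
          PySem.List.slice seqs (some (s + L)) (some (s + L * 2))) := by
  intro fuel
  induction fuel with
  | zero =>
    intro start
    rw [PySem.List.pyRange_one_eq_nil (by omega)]
    rfl
  | succ f ih =>
    intro start
    rw [PySem.List.pyRange_one_cons (by omega), List.any_cons]
    rw [show start + ((f + 1 : Nat) : Int) = (start + 1) + (f : Int) from by omega]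
    rw [← ih (start + 1)]
    cases hc : PySem.List.slice seqs (some start) (some (start + L)) ==
        PySem.List.slice seqs (some (start + L)) (some (start + L * 2)) with
    | false => simp [pvLoopA, hc]
    | true => simp [pvLoopA, hc]

-- an infix of u ++ x :: v avoiding x is an infix of u or of v
lemma pvInfix_split {α : Type} {t u v : List α} {x : α} (hx : x ∉ t)
    (h : t <:+: u ++ x :: v) : t <:+: u ∨ t <:+: v := by
  obtain ⟨s, s', hs⟩ := h
  by_cases h1 : s.length + t.length ≤ u.length
  · left
    have hpre : s ++ t <+: u ++ x :: v := ⟨s', by simpa [List.append_assoc] using hs⟩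
    have hu : u <+: u ++ x :: v := List.prefix_append u (x :: v)
    have h2 : s ++ t <+: u :=
      List.prefix_of_prefix_length_le hpre hu (by simpa using h1)
    exact (List.suffix_append s t).isInfix.trans h2.isInfix
  · by_cases h2 : u.length < s.length
    · right
      have hs2 : s ++ (t ++ s') = u ++ x :: v := by simpa [List.append_assoc] using hs
      have hd := congrArg (List.drop (u.length + 1)) hs2
      rw [List.drop_append] at hd
      have hs0 : u.length + 1 - s.length = 0 := by omega
      have hr : (u ++ x :: v).drop (u.length + 1) = v := by
        have he : u ++ x :: v = (u ++ [x]) ++ v := by simp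
        rw [he]
        have hlen : (u ++ [x]).length = u.length + 1 := by simp
        rw [← hlen, List.drop_left]
      rw [hs0, List.drop_zero, hr] at hd
      exact ⟨s.drop (u.length + 1), s', by simpa [List.append_assoc] using hd⟩
    · exfalso
      have hlt : u.length < (u ++ x :: v).length := by simp
      apply hx
      have hx1 : (u ++ x :: v)[u.length]'hlt = x := by
        rw [List.getElem_append_right (le_refl u.length)]
        simp
      have hlt2 : u.length < (s ++ t ++ s').length := by rw [hs]; exact hlt
      have hx2 : (s ++ t ++ s')[u.length]'hlt2 = x := by
        have := List.getElem_of_eq hs (i := u.length) hlt2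
        rw [this, hx1]
      have hlt3 : u.length < (s ++ t).length := by simp; omega
      rw [List.getElem_append_left hlt3] at hx2
      rw [List.getElem_append_right (by omega)] at hx2
      rw [← hx2]
      exact List.getElem_mem _

-- the run-counting scan finds exactly the runs of Ln consecutive `true`s
lemma pvRunFold (Ln : Nat) (hL : 0 < Ln) (bs : List Bool) (r : Nat) (hr : r < Ln) :
    ((bs.foldl (pvStep (Ln : Int)) ((r : Int), false)).2 = true) ↔
      (List.replicate Ln true) <:+: (List.replicate r true ++ bs) := by
  induction bs generalizing r with
  | nil =>
    constructor
    · intro h; simp at h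
    · intro h
      have hlen := h.length_le
      simp at hlen
      omega
  | cons b bs ih =>
    rw [List.foldl_cons]
    cases b with
    | true =>
      by_cases hEq : r + 1 = Ln
      · have hEq' : (r : Int) + 1 = (Ln : Int) := by exact_mod_cast congrArg Nat.cast hEq
        have hstep : pvStep (Ln : Int) ((r : Int), false) true = ((r : Int) + 1, true) := by
          simp [pvStep, hEq']
        rw [hstep, pvStep_found]
        have hconcat : List.replicate r true ++ true :: bs = List.replicate Ln true ++ bs := by
          rw [← hEq, List.replicate_succ']
          simp
        constructor
        · intro _
          rw [hconcat]
          exact (List.prefix_append _ bs).isInfix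
        · intro _; rfl
      · have hlt : r + 1 < Ln := by omega
        have hEq' : ¬((r : Int) + 1 = (Ln : Int)) := by
          intro h; exact hEq (by exact_mod_cast h)
        have hcast : (r : Int) + 1 = ((r + 1 : Nat) : Int) := by omega
        have hstep : pvStep (Ln : Int) ((r : Int), false) true =
            (((r + 1 : Nat) : Int), false) := by
          rw [pvStep]
          simp only [hEq', if_false]
          rw [← hcast]
          simp
        rw [hstep, ih (r + 1) hlt]
        have hconcat : List.replicate r true ++ true :: bs = List.replicate (r + 1) true ++ bs := by
          rw [List.replicate_succ']
          simp
        rw [hconcat]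
    | false =>
      have hstep : pvStep (Ln : Int) ((r : Int), false) false = (((0 : Nat) : Int), false) := by
        simp [pvStep]
      rw [hstep, ih 0 hL]
      simp only [List.replicate_zero, List.nil_append]
      constructor
      · intro h
        exact h.trans ⟨List.replicate r true ++ [false], by simp⟩
      · intro h
        rcases pvInfix_split (by simp) h with h' | h'
        · exact absurd (by simpa using h'.length_le) (by omega)
        · exact h'

-- a run of Ln `true`s in bs = an infix occurrence of replicate Ln true
lemma pvInfix_iff (bs : List Bool) (Ln : Nat) :
    (List.replicate Ln true <:+: bs) ↔
      ∃ sn, sn + Ln ≤ bs.length ∧ ∀ k < Ln, bs.getD (sn + k) false = true := by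
  constructor
  · rintro ⟨p, q, hpq⟩
    refine ⟨p.length, by rw [← hpq]; simp, fun k hk => ?_⟩
    have key : bs[p.length + k]? = some true := by
      rw [← hpq]
      rw [List.getElem?_append_left (by simp; omega)]
      rw [List.getElem?_append_right (by omega)]
      simp [hk]
    rw [List.getD_eq_getElem?_getD, key]
    rfl
  · rintro ⟨sn, hle, hall⟩
    have hrep : (bs.drop sn).take Ln = List.replicate Ln true := by
      apply List.ext_getElem
      · simp; omega
      · intro i h1 h2
        simp only [List.getElem_take, List.getElem_drop, List.getElem_replicate]
        have hi : i < Ln := by simpa using h2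
        have := hall i hi
        rw [List.getD_eq_getElem _ _ (by omega)] at this
        exact this
    rw [← hrep]
    exact ((List.take_prefix Ln (bs.drop sn)).isInfix).trans (bs.drop_suffix sn).isInfix

-- slice equality = pointwise equality at distance Ln
lemma pvSliceEq (seqs : List (List Int)) (Ln sn : Nat) (h : sn + 2 * Ln ≤ seqs.length) :
    ((seqs.drop sn).take Ln = (seqs.drop (sn + Ln)).take Ln) ↔
      ∀ k < Ln, seqs.getD (sn + k) ([] : List Int) = seqs.getD (sn + k + Ln) ([] : List Int) := by
  constructor
  · intro he k hk
    have h1 : k < ((seqs.drop sn).take Ln).length := by simp; omega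
    have := List.getElem_of_eq he h1
    simp only [List.getElem_take, List.getElem_drop] at this
    rw [show sn + k + Ln = sn + Ln + k from by omega]
    rw [List.getD_eq_getElem _ _ (by omega), List.getD_eq_getElem _ _ (by omega)]
    exact this
  · intro hall
    apply List.ext_getElem
    · simp; omega
    · intro i h1 h2
      simp only [List.getElem_take, List.getElem_drop]
      have hi : i < Ln := by simp at h1; omega
      have := hall i hi
      rw [show sn + i + Ln = sn + Ln + i from by omega] at this
      rw [List.getD_eq_getElem _ _ (by omega), List.getD_eq_getElem _ _ (by omega)] at this
      exact this

-- A's slice search = an infix occurrence in pvBs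
lemma pvA_iff (seqs : List (List Int)) (Ln : Nat) :
    (has_repeating_pattern_py seqs (Ln : Int) = true) ↔
      List.replicate Ln true <:+: pvBs seqs Ln := by
  by_cases hguard : (seqs.length : Int) < (Ln : Int) * 2
  · have hg' : seqs.length < Ln * 2 := by exact_mod_cast hguard
    have hA : has_repeating_pattern_py seqs (Ln : Int) = false := by
      unfold has_repeating_pattern_py
      rw [if_pos hguard]
    rw [hA]
    simp only [Bool.false_eq_true, false_iff]
    intro h
    have hlen := h.length_le
    rw [pvBs_length] at hlen
    simp at hlen
    omega
  · have hg' : Ln * 2 ≤ seqs.length := by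
      have := not_lt.mp hguard
      exact_mod_cast this
    unfold has_repeating_pattern_py
    rw [if_neg hguard, pvLoopA_eq_any]
    rw [show (0 : Int) + ((((seqs.length : Int) - (Ln : Int) * 2 + 1).toNat : Nat) : Int) =
      (seqs.length : Int) - (Ln : Int) * 2 + 1 from by omega]
    rw [List.any_eq_true, pvInfix_iff]
    constructor
    · rintro ⟨s, hmem, hP⟩
      rw [PySem.List.mem_pyRange_one] at hmem
      obtain ⟨hs0, hs1⟩ := hmem
      set sn := s.toNat with hsndef
      have hs : (sn : Int) = s := Int.toNat_of_nonneg hs0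
      have hsnle : sn + 2 * Ln ≤ seqs.length := by omega
      rw [← hs] at hP
      rw [beq_iff_eq] at hP
      have e1 : PySem.List.slice seqs (some (sn : Int)) (some ((sn : Int) + (Ln : Int))) =
          (seqs.drop sn).take Ln := PySem.List.slice_natCast_add seqs sn Ln
      have h1 : (sn : Int) + (Ln : Int) = (((sn + Ln : Nat)) : Int) := by omega
      have h2 : (sn : Int) + (Ln : Int) * 2 = (((sn + Ln : Nat)) : Int) + (Ln : Int) := by
        omega
      have e2 : PySem.List.slice seqs (some ((sn : Int) + (Ln : Int)))
          (some ((sn : Int) + (Ln : Int) * 2)) = (seqs.drop (sn + Ln)).take Ln := by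
        rw [h1, h2]
        exact PySem.List.slice_natCast_add seqs (sn + Ln) Ln
      rw [e1, e2] at hP
      refine ⟨sn, by rw [pvBs_length]; omega, fun k hk => ?_⟩
      rw [pvBs_getD _ _ _ (by omega)]
      simp only [decide_eq_true_eq]
      exact (pvSliceEq seqs Ln sn hsnle).mp hP k hk
    · rintro ⟨sn, hle, hall⟩
      rw [pvBs_length] at hle
      have hsnle : sn + 2 * Ln ≤ seqs.length := by omega
      refine ⟨(sn : Int), ?_, ?_⟩
      · rw [PySem.List.mem_pyRange_one]
        constructor
        · exact_mod_cast Nat.zero_le sn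
        · omega
      · rw [beq_iff_eq]
        have e1 : PySem.List.slice seqs (some (sn : Int)) (some ((sn : Int) + (Ln : Int))) =
            (seqs.drop sn).take Ln := PySem.List.slice_natCast_add seqs sn Ln
        have h1 : (sn : Int) + (Ln : Int) = (((sn + Ln : Nat)) : Int) := by omega
        have h2 : (sn : Int) + (Ln : Int) * 2 = (((sn + Ln : Nat)) : Int) + (Ln : Int) := by
          omega
        have e2 : PySem.List.slice seqs (some ((sn : Int) + (Ln : Int)))
            (some ((sn : Int) + (Ln : Int) * 2)) = (seqs.drop (sn + Ln)).take Ln := by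
          rw [h1, h2]
          exact PySem.List.slice_natCast_add seqs (sn + Ln) Ln
        rw [e1, e2]
        refine (pvSliceEq seqs Ln sn hsnle).mpr (fun k hk => ?_)
        have := hall k hk
        rw [pvBs_getD _ _ _ (by omega)] at this
        simpa using this

-- B's scan = an infix occurrence in pvBs
lemma pvB_iff (seqs : List (List Int)) (Ln : Nat) (hL : 0 < Ln) :
    (has_repeating_pattern_py_alt seqs (Ln : Int) = true) ↔
      List.replicate Ln true <:+: pvBs seqs Ln := by
  unfold has_repeating_pattern_py_alt
  have hLpos : ¬((Ln : Int) ≤ 0) := by exact_mod_cast Nat.not_le.mpr hL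
  rw [if_neg hLpos]
  have hfun : (fun (st : Int × Bool) (i : Int) =>
        if st.2 then st
        else if PySem.List.pyGetD seqs i ([] : List Int) =
            PySem.List.pyGetD seqs (i + (Ln : Int)) ([] : List Int) then
          if st.1 + 1 = (Ln : Int) then (st.1 + 1, true) else (st.1 + 1, false)
        else (0, false)) =
      (fun (st : Int × Bool) (i : Int) => pvStep (Ln : Int) st
        (decide (PySem.List.pyGetD seqs i ([] : List Int) =
          PySem.List.pyGetD seqs (i + (Ln : Int)) ([] : List Int)))) := by
    funext st i
    simp [pvStep]
  rw [hfun]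
  rw [show (PySem.List.pyRange 0 ((seqs.length : Int) - (Ln : Int)) 1).foldl
      (fun (st : Int × Bool) (i : Int) => pvStep (Ln : Int) st
        (decide (PySem.List.pyGetD seqs i ([] : List Int) =
          PySem.List.pyGetD seqs (i + (Ln : Int)) ([] : List Int)))) ((0 : Int), false) =
      (pvBs seqs Ln).foldl (pvStep (Ln : Int)) ((0 : Int), false) from by
    rw [pvBs, List.foldl_map]]
  have hrun := pvRunFold Ln hL (pvBs seqs Ln) 0 hL
  simpa using hrun

-- for non-positive cycle_length both programs return True
lemma pvNonpos (seqs : List (List Int)) (L : Int) (hL : L ≤ 0) :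
    has_repeating_pattern_py seqs L = true ∧ has_repeating_pattern_py_alt seqs L = true := by
  have h0 : (0 : Int) ≤ (seqs.length : Int) := Int.natCast_nonneg _
  constructor
  · unfold has_repeating_pattern_py
    rw [if_neg (by omega), pvLoopA_eq_any]
    rw [show (0 : Int) + ((((seqs.length : Int) - L * 2 + 1).toNat : Nat) : Int) =
      (seqs.length : Int) - L * 2 + 1 from by omega]
    rw [List.any_eq_true]
    refine ⟨(seqs.length : Int) - L * 2, ?_, ?_⟩
    · rw [PySem.List.mem_pyRange_one]
      omega
    · rw [beq_iff_eq]
      rw [PySem.List.slice_toNat seqs (by omega) (by omega)]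
      rw [PySem.List.slice_toNat seqs (by omega) (by omega)]
      rw [List.drop_eq_nil_of_le (by omega)]
      rw [List.drop_eq_nil_of_le (by omega)]
      simp
  · unfold has_repeating_pattern_py_alt
    rw [if_pos hL]

-- ===== VERDICT (by name: the statement is the Claim_ definition above) =====
theorem has_repeating_pattern_py_spec : Claim_equal_has_repeating_pattern_py := by
  intro seqs L _
  unfold Spec_has_repeating_pattern_py
  by_cases hL : L ≤ 0
  · obtain ⟨hA, hB⟩ := pvNonpos seqs L hL
    rw [hA, hB]
  · have hL' : 0 < L := by omega
    lift L to Nat using le_of_lt hL' with Ln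
    have hLn : 0 < Ln := by exact_mod_cast hL'
    have hiff := (pvA_iff seqs Ln).trans (pvB_iff seqs Ln hLn).symm
    cases hA : has_repeating_pattern_py seqs (Ln : Int) with
    | true => exact (hiff.mp hA).symm
    | false =>
      cases hB : has_repeating_pattern_py_alt seqs (Ln : Int) with
      | true => rw [← hA, hiff.mpr hB]
      | false => rfl
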